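-- pv_equiv track=rewrite | github.com/ManhChuVan/BaiTapCuoiKi_CTDLGT | Chuong2/B9_TrungCot.py | TrungCot
-- ===== SOURCE A (Python) =====
-- def TrungCot(mang):
--   n = len(mang)
--   for i in range(n - 1):
--     for j in range(i+1, n):
--       for k in range(n):
--         if mang[k][i] != mang[k][j]:
--           break
--       else:
--         return True
--   return False
-- ===== SOURCE B (Python) =====
-- def TrungCot(mang):
--     n = len(mang)
--     seen = set()
--     for i in range(n):
--         col = tuple(row[i] for row in mang)
--         if col in seen:
--             return True
--         seen.add(col)
--     return False
-- ===== Notes on version B (the rewrite author's own statement) =====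
-- stated objective: alternative
-- what changed: Replaces A's pairwise column comparison (triple nested loop) with a single pass that materialises each column as a tuple and detects a repeat via a hash set.
-- outside the precondition, e.g. on TrungCot([[]]): A returns False, B raises IndexError; on TrungCot([[1, 2], [3]]): A returns False, B raises IndexError
import Mathlib
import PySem

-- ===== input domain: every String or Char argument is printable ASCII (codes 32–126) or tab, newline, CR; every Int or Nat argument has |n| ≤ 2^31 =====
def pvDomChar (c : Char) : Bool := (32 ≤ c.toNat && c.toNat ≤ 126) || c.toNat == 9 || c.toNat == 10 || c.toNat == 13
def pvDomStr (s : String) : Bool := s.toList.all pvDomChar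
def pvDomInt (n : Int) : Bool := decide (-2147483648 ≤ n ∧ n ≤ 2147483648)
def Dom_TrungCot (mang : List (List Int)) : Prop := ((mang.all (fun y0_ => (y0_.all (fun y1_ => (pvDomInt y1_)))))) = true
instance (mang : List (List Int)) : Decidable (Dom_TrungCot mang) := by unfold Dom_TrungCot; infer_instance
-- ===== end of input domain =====

-- B replaces A's pairwise column comparison with a one-pass hash-set duplicate scan over column tuples.

-- ===== PORT A =====
def TrungCot (mang : List (List Int)) : Bool :=
  let n := mang.length
  (List.range (n - 1)).any fun i =>
    (List.range' (i + 1) (n - (i + 1))).any fun j =>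
      -- for k in range(n): if mang[k][i] != mang[k][j]: break / else: return True
      (List.range n).all fun k =>
        ((mang[k]?.getD [])[i]?.getD 0) == ((mang[k]?.getD [])[j]?.getD 0)

-- ===== PORT B =====
-- col = tuple(row[i] for row in mang)
def pvCol (mang : List (List Int)) (i : Nat) : List Int :=
  mang.map (fun row => row[i]?.getD 0)

-- the 'for i in range(n)' loop with the running 'seen' set and early return
def pvSeenLoop (mang : List (List Int)) (seen : PySem.Set (List Int)) : List Nat → Bool
  | [] => false
  | i :: rest =>
    let col := pvCol mang i
    if PySem.Set.contains seen col then true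
    else pvSeenLoop mang (PySem.Set.add seen col) rest

def TrungCot_alt (mang : List (List Int)) : Bool :=
  pvSeenLoop mang PySem.Set.empty (List.range mang.length)

-- ===== PRECONDITION & SPEC =====
-- Pre_ excludes matrices with a row shorter than len(mang): there the Python programs can
-- raise IndexError (B always does; A returns False on some of them thanks to its early break,
-- see the cites in the claim).
def Pre_TrungCot (mang : List (List Int)) : Prop :=
  ∀ row ∈ mang, mang.length ≤ row.length
instance (mang : List (List Int)) : Decidable (Pre_TrungCot mang) := by
  unfold Pre_TrungCot; infer_instance

def pvWitness_TrungCot : List (List Int) := [[1, 2], [1, 2]]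

def Spec_TrungCot (mang : List (List Int)) (out : Bool) : Prop := out = TrungCot_alt mang
instance (mang : List (List Int)) (out : Bool) : Decidable (Spec_TrungCot mang out) := by
  unfold Spec_TrungCot; infer_instance

-- ===== CLAIM (what is proved, stated in full; the proofs are below) =====
def Claim_equal_TrungCot : Prop :=
  ∀ (mang : List (List Int)), Dom_TrungCot mang → Pre_TrungCot mang →
    Spec_TrungCot mang (TrungCot mang)

-- ===== LEMMAS AND PROOFS =====

-- the duplicate-pair condition both programs decide
def pvDup (mang : List (List Int)) : Prop :=
  ∃ i j, i < j ∧ j < mang.length ∧ pvCol mang i = pvCol mang j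

-- A's inner k-loop decides equality of the two column tuples
lemma colEq_iff (mang : List (List Int)) (i j : Nat) :
    ((List.range mang.length).all fun k =>
      ((mang[k]?.getD [])[i]?.getD 0) == ((mang[k]?.getD [])[j]?.getD 0)) = true
    ↔ pvCol mang i = pvCol mang j := by
  rw [List.all_eq_true]
  constructor
  · intro h
    apply List.ext_getElem (by simp [pvCol])
    intro k hk _
    have hk' : k < mang.length := by simpa [pvCol] using hk
    have := h k (List.mem_range.mpr hk')
    simpa [pvCol, List.getElem?_eq_getElem hk'] using this
  · intro h k hk
    have hk' : k < mang.length := List.mem_range.mp hk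
    have h2 := congrArg (fun l => l[k]?) h
    simp only [pvCol, List.getElem?_map, List.getElem?_eq_getElem hk', Option.map_some,
      Option.some.injEq] at h2
    simp [List.getElem?_eq_getElem hk', h2]

lemma A_iff (mang : List (List Int)) : TrungCot mang = true ↔ pvDup mang := by
  unfold TrungCot pvDup
  simp only [List.any_eq_true, List.mem_range, List.mem_range'_1]
  constructor
  · rintro ⟨i, hi, j, ⟨hij, hj⟩, hall⟩
    exact ⟨i, j, by omega, by omega, (colEq_iff mang i j).mp hall⟩
  · rintro ⟨i, j, hij, hj, hcol⟩
    exact ⟨i, by omega, j, ⟨by omega, by omega⟩, (colEq_iff mang i j).mpr hcol⟩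

-- invariant of B's loop
lemma seenLoop_iff (mang : List (List Int)) (seen : PySem.Set (List Int)) (is : List Nat) :
    pvSeenLoop mang seen is = true ↔
      (∃ i ∈ is, pvCol mang i ∈ seen) ∨ ¬ (is.map (pvCol mang)).Nodup := by
  induction is generalizing seen with
  | nil => simp [pvSeenLoop]
  | cons i rest ih =>
    simp only [pvSeenLoop]
    by_cases hc : pvCol mang i ∈ seen
    · rw [if_pos ((PySem.Set.contains_iff seen _).mpr hc)]
      exact iff_of_true rfl (Or.inl ⟨i, List.mem_cons_self, hc⟩)
    · rw [if_neg (by simpa [PySem.Set.contains_iff] using hc), ih]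
      simp only [List.mem_cons, List.map_cons, List.nodup_cons, PySem.Set.mem_add,
        List.mem_map, not_and_or, not_not, eq_comm (b := pvCol mang i)]
      constructor
      · rintro (⟨x, hx, hmem | heq⟩ | hnd)
        · exact Or.inl ⟨x, Or.inr hx, hmem⟩
        · exact Or.inr (Or.inl ⟨x, hx, heq⟩)
        · exact Or.inr (Or.inr hnd)
      · rintro (⟨x, hx | hx, hmem⟩ | ⟨x, hx, heq⟩ | hnd)
        · exact absurd (hx ▸ hmem) hc
        · exact Or.inl ⟨x, hx, Or.inl hmem⟩
        · exact Or.inl ⟨x, hx, Or.inr heq⟩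
        · exact Or.inr hnd

lemma nodup_map_range_iff (f : Nat → List Int) (n : Nat) :
    ¬ ((List.range n).map f).Nodup ↔ ∃ i j, i < j ∧ j < n ∧ f i = f j := by
  rw [List.nodup_iff_getElem?_ne_getElem?]
  push Not
  constructor
  · rintro ⟨i, j, hij, hj, h⟩
    have hj' : j < n := by simpa using hj
    have hi' : i < n := lt_trans hij hj'
    refine ⟨i, j, hij, hj', ?_⟩
    simpa [List.getElem?_map, List.getElem?_range, hi', hj'] using h
  · rintro ⟨i, j, hij, hj, h⟩
    exact ⟨i, j, hij, by simpa using hj,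
      by simp [lt_trans hij hj, hj, h]⟩

lemma B_iff (mang : List (List Int)) : TrungCot_alt mang = true ↔ pvDup mang := by
  unfold TrungCot_alt pvDup
  rw [seenLoop_iff, nodup_map_range_iff]
  simp [PySem.Set.empty]

-- ===== VERDICT (by name: the statement is the Claim_ definition above) =====
theorem TrungCot_spec : Claim_equal_TrungCot := by
  intro mang _ _
  unfold Spec_TrungCot
  have h := (A_iff mang).trans (B_iff mang).symm
  exact Bool.coe_iff_coe.mp h
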